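-- pv_equiv track=rewrite | github.com/Blastz13/telegram-bot | telegram-bot/output.py | week_timetable
-- ===== SOURCE A (Python) =====
-- def week_timetable(homework):
--     row = ""
--     for i in range(0, len(homework)):
--         if i == 0:
--             row = f"--------------\n{homework[i][0]}" \
--                   f"\n{homework[i][1]}.{homework[i][2]}\n"
--             continue
--         elif homework[i][0] != homework[i - 1][0]:
--             row += f"--------------\n{homework[i][0]}" \
--                    f"\n{homework[i][1]}.{homework[i][2]}\n"
--             continue
--         row += f"{homework[i][1]}.{homework[i][2]}\n"
--     return row
-- ===== SOURCE B (Python) =====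
-- def week_timetable(homework):
--     parts = []
--     rest = homework
--     while rest:
--         key = rest[0][0]
--         i = 0
--         while i < len(rest) and rest[i][0] == key:
--             i += 1
--         run, rest = rest[:i], rest[i:]
--         parts.append(f"--------------\n{key}\n")
--         for _day, lesson, hw in run:
--             parts.append(f"{lesson}.{hw}\n")
--     return "".join(parts)
-- ===== Notes on version B (the rewrite author's own statement) =====
-- stated objective: idiomatic
-- what changed: B segments the list into maximal consecutive runs sharing the same day (a group-by pass emitting one header per run and all its entries), collected in a list joined once, instead of A's index loop comparing homework[i][0] with homework[i-1][0] and repeated string concatenation.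
import Mathlib
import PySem

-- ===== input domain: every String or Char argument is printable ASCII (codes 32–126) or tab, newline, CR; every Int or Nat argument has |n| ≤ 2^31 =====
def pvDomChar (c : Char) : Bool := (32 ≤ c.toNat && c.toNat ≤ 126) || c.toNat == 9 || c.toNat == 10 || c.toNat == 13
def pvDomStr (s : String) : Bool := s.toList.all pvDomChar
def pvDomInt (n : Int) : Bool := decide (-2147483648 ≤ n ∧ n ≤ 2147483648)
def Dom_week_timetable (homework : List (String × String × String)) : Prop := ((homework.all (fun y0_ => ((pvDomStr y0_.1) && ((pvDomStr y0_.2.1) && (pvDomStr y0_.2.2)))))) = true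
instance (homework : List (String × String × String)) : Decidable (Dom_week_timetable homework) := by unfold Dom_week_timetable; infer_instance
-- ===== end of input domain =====

-- B groups the rows into maximal consecutive same-day runs (one header per run, then the
-- run's entries) collected into a list joined once, instead of A's index loop comparing
-- homework[i][0] with homework[i-1][0]; objective: idiomatic, same return value.

-- ===== PORT A =====
-- loop body of A's 'for i in range(0, len(homework))' (named so the lemmas can refer to it)
def pvStepA (hw : List (String × String × String)) (row : String) (i : Int) : String :=
  let cur := PySem.List.pyGetD hw i ("", "", "")
  if i == 0 then
    "--------------\n" ++ cur.1 ++ "\n" ++ cur.2.1 ++ "." ++ cur.2.2 ++ "\n"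
  else if cur.1 != (PySem.List.pyGetD hw (i - 1) ("", "", "")).1 then
    row ++ ("--------------\n" ++ cur.1 ++ "\n" ++ cur.2.1 ++ "." ++ cur.2.2 ++ "\n")
  else
    row ++ (cur.2.1 ++ "." ++ cur.2.2 ++ "\n")

-- indices 0 ≤ i < len(homework), so pyGetD never sees an out-of-range index
def week_timetable (homework : List (String × String × String)) : String :=
  (PySem.List.pyRange 0 (homework.length : Int) 1).foldl (pvStepA homework) ""

-- ===== PORT B =====
-- outer 'while rest:' of Source B: split off the maximal run of rows sharing rest[0][0],
-- emit its header followed by its entries, continue with the remainder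
def altParts : List (String × String × String) → List String
  | [] => []
  | x :: rest =>
    ("--------------\n" ++ x.1 ++ "\n") ::
      (((x :: rest).takeWhile (fun e => e.1 == x.1)).map (fun e => e.2.1 ++ "." ++ e.2.2 ++ "\n") ++
        altParts ((x :: rest).dropWhile (fun e => e.1 == x.1)))
termination_by l => l.length
decreasing_by
  simp only [List.dropWhile_cons, beq_self_eq_true, if_true]
  exact Nat.lt_succ_of_le (List.length_dropWhile_le _ _)

def week_timetable_alt (homework : List (String × String × String)) : String :=
  PySem.Str.join "" (altParts homework)

-- ===== PRECONDITION & SPEC =====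
def Spec_week_timetable (homework : List (String × String × String)) (out : String) : Prop := out = week_timetable_alt homework
instance (homework : List (String × String × String)) (out : String) : Decidable (Spec_week_timetable homework out) := by unfold Spec_week_timetable; infer_instance

-- ===== CLAIM (what is proved, stated in full; the proofs are below) =====
def Claim_equal_week_timetable : Prop := ∀ (homework : List (String × String × String)), Dom_week_timetable homework → Spec_week_timetable homework (week_timetable homework)

-- ===== LEMMAS AND PROOFS =====

-- the two string pieces both programs build
def pvHdr (d : String) : String := "--------------\n" ++ d ++ "\n"
def pvEnt (e : String × String × String) : String := e.2.1 ++ "." ++ e.2.2 ++ "\n"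

-- common reference: emit each row's entry, preceded by a header when its day differs from prev
def pvG (prev : String) : List (String × String × String) → String
  | [] => ""
  | e :: l => (if e.1 == prev then pvEnt e else pvHdr e.1 ++ pvEnt e) ++ pvG e.1 l

def pvT : List (String × String × String) → String
  | [] => ""
  | x :: rest => pvHdr x.1 ++ (pvEnt x ++ pvG x.1 rest)

theorem pv_sjoin_nil : PySem.Str.join "" ([] : List String) = "" := by decide

theorem pv_sjoin_cons (s : String) (l : List String) :
    PySem.Str.join "" (s :: l) = s ++ PySem.Str.join "" l := by
  cases l with
  | nil => simp [PySem.Str.join, PySem.Chars.join_singleton]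
  | cons t l => simp [PySem.Str.join, PySem.Chars.join_cons_cons, String.ofList_append]

theorem pv_sjoin_append (a b : List String) :
    PySem.Str.join "" (a ++ b) = PySem.Str.join "" a ++ PySem.Str.join "" b := by
  induction a with
  | nil => simp [pv_sjoin_nil, String.empty_append]
  | cons s a ih => simp [pv_sjoin_cons, ih, String.append_assoc]

theorem pvAmain : ∀ (l : List (String × String × String)) (pre : List (String × String × String))
    (p : String × String × String) (acc : String),
    (PySem.List.pyRange ((pre.length + 1 : ℕ) : ℤ) ((pre.length + 1 + l.length : ℕ) : ℤ) 1).foldl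
      (pvStepA (pre ++ p :: l)) acc = acc ++ pvG p.1 l := by
  intro l
  induction l with
  | nil =>
    intro pre p acc
    rw [PySem.List.pyRange_one_eq_nil (by simp)]
    simp [pvG]
  | cons e l' ih =>
    intro pre p acc
    rw [PySem.List.pyRange_one_cons (by push_cast [List.length_cons]; omega)]
    simp only [List.foldl_cons]
    have hcur : PySem.List.pyGetD (pre ++ p :: e :: l') ((pre.length + 1 : ℕ) : ℤ) ("", "", "") = e := by
      rw [PySem.List.pyGetD_natCast, List.getD_eq_getElem?_getD,
        List.getElem?_append_right (by omega)]
      simp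
    have hprev : PySem.List.pyGetD (pre ++ p :: e :: l') (((pre.length + 1 : ℕ) : ℤ) - 1) ("", "", "") = p := by
      have h1 : (((pre.length + 1 : ℕ) : ℤ) - 1) = ((pre.length : ℕ) : ℤ) := by push_cast; ring
      rw [h1, PySem.List.pyGetD_natCast, List.getD_eq_getElem?_getD,
        List.getElem?_append_right (le_refl _)]
      simp
    have hne : (((pre.length + 1 : ℕ) : ℤ) == 0) = false := by
      rw [beq_eq_false_iff_ne]; omega
    have hstep : pvStepA (pre ++ p :: e :: l') acc ((pre.length + 1 : ℕ) : ℤ)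
        = acc ++ (if e.1 == p.1 then pvEnt e else pvHdr e.1 ++ pvEnt e) := by
      simp only [pvStepA, hcur, hprev, hne, Bool.false_eq_true, if_false]
      by_cases hk : (e.1 == p.1) = true
      · simp [bne, hk, pvEnt]
      · simp [bne, Bool.eq_false_iff.mpr hk, pvEnt, pvHdr, String.append_assoc]
    rw [hstep]
    have hr1 : (((pre.length + 1 : ℕ) : ℤ) + 1) = (((pre ++ [p]).length + 1 : ℕ) : ℤ) := by
      push_cast [List.length_append, List.length_cons, List.length_nil]; ring
    have hr2 : ((pre.length + 1 + (e :: l').length : ℕ) : ℤ) = (((pre ++ [p]).length + 1 + l'.length : ℕ) : ℤ) := by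
      push_cast [List.length_append, List.length_cons, List.length_nil]; ring
    have happ : pre ++ p :: e :: l' = (pre ++ [p]) ++ e :: l' := by simp
    rw [hr1, hr2, happ, ih (pre ++ [p]) e]
    simp [pvG, String.append_assoc]

theorem pvA_eq (hw : List (String × String × String)) : week_timetable hw = pvT hw := by
  cases hw with
  | nil => decide
  | cons x rest =>
    unfold week_timetable
    rw [PySem.List.pyRange_one_cons (by simp)]
    simp only [List.foldl_cons]
    have h0 : pvStepA (x :: rest) "" 0 = pvHdr x.1 ++ pvEnt x := by
      simp [pvStepA, PySem.List.pyGetD_zero_cons, pvHdr, pvEnt, String.append_assoc]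
    have key := pvAmain rest [] x (pvHdr x.1 ++ pvEnt x)
    have hr1 : ((([] : List (String × String × String)).length + 1 : ℕ) : ℤ) = (0 : ℤ) + 1 := by
      simp
    have hr2 : ((([] : List (String × String × String)).length + 1 + rest.length : ℕ) : ℤ)
        = (((x :: rest).length : ℕ) : ℤ) := by
      push_cast [List.length_cons, List.length_nil]; ring
    rw [hr1, hr2, List.nil_append] at key
    rw [h0, key]
    simp [pvT, String.append_assoc]

theorem pvBmain : ∀ (n : ℕ) (l : List (String × String × String)), l.length ≤ n → ∀ (key : String),
    PySem.Str.join "" ((l.takeWhile (fun e => e.1 == key)).map (fun e => e.2.1 ++ "." ++ e.2.2 ++ "\n"))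
      ++ PySem.Str.join "" (altParts (l.dropWhile (fun e => e.1 == key)))
      = pvG key l := by
  intro n
  induction n with
  | zero =>
    intro l hl key
    have : l = [] := by cases l <;> simp_all
    subst this
    simp [altParts, pv_sjoin_nil, pvG]
  | succ m ih =>
    intro l hl key
    cases l with
    | nil => simp [altParts, pv_sjoin_nil, pvG]
    | cons e l' =>
      by_cases h : (e.1 == key) = true
      · have hek : e.1 = key := by simpa using h
        subst hek
        simp only [List.takeWhile_cons, List.dropWhile_cons, beq_self_eq_true, if_true,
          List.map_cons]
        rw [pv_sjoin_cons, String.append_assoc, ih l' (by simpa using hl) e.1]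
        simp [pvG, pvEnt]
      · have h' : (e.1 == key) = false := Bool.eq_false_iff.mpr h
        have key := ih l' (by simpa using hl) e.1
        simp only [List.takeWhile_cons, List.dropWhile_cons, h', Bool.false_eq_true, if_false,
          List.map_nil]
        rw [pv_sjoin_nil, String.empty_append, altParts]
        simp only [List.takeWhile_cons, List.dropWhile_cons, beq_self_eq_true, if_true,
          List.map_cons, pv_sjoin_cons, pv_sjoin_append]
        simp only [String.append_assoc] at key ⊢
        rw [key]
        simp [pvG, h', pvHdr, pvEnt, String.append_assoc]

theorem pvB_eq (hw : List (String × String × String)) : week_timetable_alt hw = pvT hw := by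
  cases hw with
  | nil => simp [week_timetable_alt, altParts, pv_sjoin_nil, pvT]
  | cons x rest =>
    unfold week_timetable_alt
    have hb := pvBmain (x :: rest).length (x :: rest) (le_refl _) x.1
    rw [altParts, pv_sjoin_cons, pv_sjoin_append, hb]
    simp [pvT, pvG, pvHdr, pvEnt, String.append_assoc]

-- ===== VERDICT (by name: the statement is the Claim_ definition above) =====
theorem week_timetable_spec : Claim_equal_week_timetable := by
  intro hw _
  unfold Spec_week_timetable
  rw [pvA_eq, pvB_eq]
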